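-- pv_equiv track=rewrite | github.com/Rainboylvx/pcs | luogu/CF865D/2.py | check
-- ===== SOURCE A (Python) =====
-- import itertools
--
-- def check(l):
--     l =list(map(lambda x: -1 if x == 2 else 1,filter(lambda x: not x == 1,list(l))))
--     if( l.count(-1) != l.count(1)):
--         return 0
--     if len(l) ==0:
--         return 0
--     ll = list(itertools.accumulate(l))
--     if not any([x > 0 for x in list(ll)]):
--         return 1
--     return 0
-- ===== SOURCE B (Python) =====
-- def check(l):
--     # Bracket matcher: 1s are ignored; a 2 is an opening bracket (push),
--     # anything else is a closing bracket (pop, failing immediately if the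
--     # stack is empty).  Valid iff some bracket was seen and the stack is
--     # empty at the end.
--     stack = []
--     seen = False
--     for x in l:
--         if x == 1:
--             continue
--         seen = True
--         if x == 2:
--             stack.append(x)
--         else:
--             if not stack:
--                 return 0
--             stack.pop()
--     return 1 if seen and not stack else 0
-- ===== Notes on version B (the rewrite author's own statement) =====
-- stated objective: alternative
-- what changed: Replaced counting plus prefix-sum accumulation plus any() over intermediate lists by a classic stack-based bracket matcher (push on 2, pop on other non-1 values) with an early return the moment a pop hits an empty stack.
import Mathlib
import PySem

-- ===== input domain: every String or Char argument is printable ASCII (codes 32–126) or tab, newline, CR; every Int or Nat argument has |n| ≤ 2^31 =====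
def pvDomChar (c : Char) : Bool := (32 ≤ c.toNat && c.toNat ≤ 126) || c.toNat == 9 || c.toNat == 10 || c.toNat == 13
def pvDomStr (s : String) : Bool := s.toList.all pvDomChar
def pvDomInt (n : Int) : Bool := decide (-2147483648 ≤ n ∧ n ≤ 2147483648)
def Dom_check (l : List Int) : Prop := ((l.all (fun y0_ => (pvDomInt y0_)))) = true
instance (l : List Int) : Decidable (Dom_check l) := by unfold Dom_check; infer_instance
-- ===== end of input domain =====

-- B replaces A's counting + prefix-sum-accumulation + any() passes by a stack-based
-- bracket matcher (push on 2, pop on other non-1 values, early return on empty pop).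

-- ===== PORT A =====
-- hand port of itertools.accumulate on Int lists (exact: partial sums m[0], m[0]+m[1], …;
-- started at 0 since 0 + x = x)
def pyAccumulate : Int → List Int → List Int
  | _, [] => []
  | t, x :: xs => (t + x) :: pyAccumulate (t + x) xs

def check (l : List Int) : Int :=
  let m := (l.filter (fun x => !(x == 1))).map (fun x => if x == 2 then (-1 : Int) else 1)
  if m.count (-1) ≠ m.count 1 then 0
  else if m.length = 0 then 0
  else if !((pyAccumulate 0 m).any (fun x => decide (x > 0))) then 1 else 0

-- ===== PORT B =====
-- the loop with early return, as structural recursion over the remaining input,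
-- carrying the stack and the seen flag
def checkGo : List Int → List Int → Bool → Int
  | [], stack, seen => if seen && stack.isEmpty then 1 else 0
  | x :: xs, stack, seen =>
    if x == 1 then checkGo xs stack seen
    else if x == 2 then checkGo xs (x :: stack) true
    else match stack with
      | [] => 0
      | _ :: rest => checkGo xs rest true

def check_alt (l : List Int) : Int := checkGo l [] false

-- ===== PRECONDITION & SPEC =====
def Spec_check (l : List Int) (out : Int) : Prop := out = check_alt l
instance (l : List Int) (out : Int) : Decidable (Spec_check l out) := by unfold Spec_check; infer_instance

-- ===== CLAIM (what is proved, stated in full; the proofs are below) =====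
def Claim_equal_check : Prop := ∀ (l : List Int), Dom_check l → Spec_check l (check l)

-- ===== LEMMAS AND PROOFS =====

-- B's matcher viewed on A's mapped tokens (-1 = open / push, 1 = close / pop),
-- tracking only the stack height
def goM : List Int → Nat → Bool → Int
  | [], k, seen => if seen && k == 0 then 1 else 0
  | v :: vs, k, seen =>
    if v = -1 then goM vs (k + 1) true
    else match k with
      | 0 => 0
      | k' + 1 => goM vs k' true

-- the stack matcher only depends on the stack through its height, acting on mapped tokens
theorem checkGo_eq_goM (l : List Int) (stack : List Int) (seen : Bool) :
    checkGo l stack seen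
      = goM ((l.filter (fun x => !(x == 1))).map (fun x => if x == 2 then (-1 : Int) else 1))
          stack.length seen := by
  induction l generalizing stack seen with
  | nil => cases stack <;> simp [checkGo, goM]
  | cons x xs ih =>
    by_cases h1 : x = 1
    · simpa [checkGo, h1] using ih stack seen
    · by_cases h2 : x = 2
      · simpa [checkGo, h1, h2, goM] using ih (x :: stack) true
      · have hne : ¬ ((if x = 2 then (-1 : Int) else 1) = -1) := by simp [h2]
        cases stack with
        | nil => simp [checkGo, h1, h2, goM, hne]
        | cons y rest => simpa [checkGo, h1, h2, goM, hne] using ih rest true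

-- characterisation of the matcher on ±1 token lists: succeeds iff something was seen,
-- the tokens balance against the initial height, and no prefix sum exceeds the height
theorem goM_char (m : List Int) (k : Nat) (seen : Bool)
    (htok : ∀ v ∈ m, v = -1 ∨ v = 1) :
    goM m k seen
      = if (seen || !m.isEmpty) ∧ m.sum = (k : Int)
           ∧ !((pyAccumulate (-(k : Int)) m).any (fun x => decide (x > 0)))
        then 1 else 0 := by
  induction m generalizing k seen with
  | nil =>
    simp only [goM, pyAccumulate, List.isEmpty_nil, List.sum_nil, List.any_nil]
    cases seen <;> simp <;> omega
  | cons v vs ih =>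
    have ih' := fun k seen => ih k seen (fun v hv => htok v (by simp [hv]))
    by_cases hv : v = -1
    · subst hv
      have h1 : ¬ ((-(k : Int)) + -1 > 0) := by omega
      rw [show (goM ((-1 : Int) :: vs) k seen) = goM vs (k + 1) true from by simp [goM]]
      rw [ih']
      have hk : (-(↑(k + 1) : Int)) = -(k : Int) + -1 := by push_cast; ring
      simp only [pyAccumulate, List.any_cons, List.isEmpty_cons, List.sum_cons, hk,
        decide_eq_false h1, Bool.false_or]
      congr 1
      apply propext
      constructor
      · rintro ⟨-, hs, ha⟩; exact ⟨by simp, by push_cast at hs ⊢; omega, ha⟩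
      · rintro ⟨-, hs, ha⟩; exact ⟨by simp, by push_cast at hs ⊢; omega, ha⟩
    · have hv1 : v = 1 := by rcases htok v (by simp) with h | h <;> [exact absurd h hv; exact h]
      subst hv1
      cases k with
      | zero =>
        have hpos : ((-((0 : Nat) : Int)) + 1 > 0) := by norm_num
        rw [show (goM ((1 : Int) :: vs) 0 seen) = 0 from by simp [goM]]
        simp only [pyAccumulate, List.any_cons, decide_eq_true_eq, hpos, decide_true,
          Bool.true_or, Bool.not_true]
        simp
      | succ k' =>
        have h1 : ¬ ((-(k' : Int)) > 0) := by omega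
        have hk : (-(↑(k' + 1) : Int)) + 1 = -(k' : Int) := by push_cast; omega
        rw [show (goM ((1 : Int) :: vs) (k' + 1) seen) = goM vs k' true from by simp [goM]]
        rw [ih']
        simp only [pyAccumulate, List.any_cons, List.isEmpty_cons, List.sum_cons, hk,
          decide_eq_false h1, Bool.false_or]
        congr 1
        apply propext
        constructor
        · rintro ⟨-, hs, ha⟩; exact ⟨by simp, by push_cast at hs ⊢; omega, ha⟩
        · rintro ⟨-, hs, ha⟩; exact ⟨by simp, by push_cast at hs ⊢; omega, ha⟩

-- on ±1 token lists the sum is the signed count difference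
theorem sum_eq_counts (m : List Int) (h : ∀ v ∈ m, v = -1 ∨ v = 1) :
    m.sum = (m.count 1 : Int) - (m.count (-1) : Int) := by
  induction m with
  | nil => simp
  | cons x xs ih =>
    have hx := h x (by simp)
    have hxs := ih (fun v hv => h v (by simp [hv]))
    rcases hx with hx | hx <;> simp [hx, hxs] <;> ring

theorem check_eq_alt (l : List Int) : check l = check_alt l := by
  unfold check check_alt
  rw [checkGo_eq_goM]
  set m := (l.filter (fun x => !(x == 1))).map (fun x => if x == 2 then (-1 : Int) else 1) with hm
  have hpm : ∀ v ∈ m, v = -1 ∨ v = 1 := by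
    intro v hv
    rw [hm] at hv
    simp only [List.mem_map] at hv
    obtain ⟨x, -, hx⟩ := hv
    by_cases h2 : x = 2 <;> simp [h2] at hx <;> omega
  simp only [List.length_nil]
  rw [goM_char m 0 false hpm]
  have hsum := sum_eq_counts m hpm
  clear hm
  clear_value m
  by_cases hnil : m = []
  · rw [hnil]; simp [pyAccumulate]
  · have hie : m.isEmpty = false := by simpa using hnil
    have hl0 : m.length ≠ 0 := by simpa using hnil
    by_cases hc : m.count (-1) = m.count 1
    · have hs0 : m.sum = 0 := by rw [hsum]; omega
      by_cases ha : (pyAccumulate (-((0 : Nat) : Int)) m).any (fun x => decide (x > 0)) = true <;>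
        simp_all
    · have hs : m.sum ≠ 0 := by rw [hsum]; omega
      simp [hc, hs, hie]

-- ===== VERDICT (by name: the statement is the Claim_ definition above) =====
theorem check_spec : Claim_equal_check := by
  intro l _
  unfold Spec_check
  exact check_eq_alt l
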